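-- pv_equiv track=rewrite | github.com/ml703852/2048 | main.py | shift_right
-- ===== SOURCE A (Python) =====
-- def shift_right(game_board):
--     new_board = []
--     for row in range(0,4):
--         new_board.append([0] * 4)
--
--     for row in range(0,4):
--         pos = 3
--         for column in reversed((range(0,4))):
--             if game_board[row][column] != 0:
--                 new_board[row][pos] = game_board[row][column]
--                 pos -= 1
--     return new_board
-- ===== SOURCE B (Python) =====
-- def shift_right(game_board):
--     # Stable sort each row's first four cells by truthiness: False (zeros) sort
--     # first, True (nonzeros) last, and stability keeps the nonzeros' order.
--     return [sorted((game_board[r][c] for c in range(4)), key=bool) for r in range(4)]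
-- ===== Notes on version B (the rewrite author's own statement) =====
-- stated objective: idiomatic
-- what changed: Replaces A's reverse column scan with a write-position pointer into a pre-built zero board by a per-row stable sort with key=bool, which pushes nonzeros right while stability preserves their order.
import Mathlib
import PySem

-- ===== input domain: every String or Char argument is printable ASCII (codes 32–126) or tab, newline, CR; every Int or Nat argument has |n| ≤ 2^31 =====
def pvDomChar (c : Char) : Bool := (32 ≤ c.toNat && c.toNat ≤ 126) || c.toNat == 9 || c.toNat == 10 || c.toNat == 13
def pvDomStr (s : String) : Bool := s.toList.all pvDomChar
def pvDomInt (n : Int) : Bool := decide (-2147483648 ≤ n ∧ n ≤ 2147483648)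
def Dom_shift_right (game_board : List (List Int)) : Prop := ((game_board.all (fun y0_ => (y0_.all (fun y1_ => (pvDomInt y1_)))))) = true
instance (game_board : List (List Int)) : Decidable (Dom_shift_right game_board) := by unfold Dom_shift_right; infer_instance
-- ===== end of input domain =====

-- B replaces A's reverse column scan with a write-position pointer into a pre-built zero board
-- by a per-row stable sort with key=bool (zeros first, nonzeros last, order kept by stability).


-- ===== PORT A =====
-- loop body of 'for column in reversed(range(0,4))'; 'new_board[row][pos] = v' becomes nested pySetD;
-- pyGetD/pySetD are exact here because under Pre_ every index used is in range
def pvInnerStep (game_board : List (List Int)) (row : Int)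
    (st : List (List Int) × Int) (column : Int) : List (List Int) × Int :=
  let v := PySem.List.pyGetD (PySem.List.pyGetD game_board row []) column 0
  if v ≠ 0 then
    (PySem.List.pySetD st.1 row (PySem.List.pySetD (PySem.List.pyGetD st.1 row []) st.2 v), st.2 - 1)
  else st

-- the whole 'for column in reversed(range(0,4))' loop ('pos = 3' is the initial state)
def pvRowLoop (game_board : List (List Int)) (row : Int) (nb : List (List Int)) : List (List Int) :=
  ((PySem.List.pyRange 0 4 1).reverse.foldl (pvInnerStep game_board row) (nb, (3 : Int))).1

def shift_right (game_board : List (List Int)) : List (List Int) :=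
  let new_board := (PySem.List.pyRange 0 4 1).foldl (fun nb _ => nb ++ [[0, 0, 0, 0]]) ([] : List (List Int))
  (PySem.List.pyRange 0 4 1).foldl
    (fun nb row => pvRowLoop game_board row nb)
    new_board

-- ===== PORT B =====
-- one row of B: sorted(row cells, key=bool) — key bool(v) is ported as decide (v ≠ 0) : Bool
def pvRowB (game_board : List (List Int)) (row : Int) : List Int :=
  PySem.List.sorted
    ((PySem.List.pyRange 0 4 1).map (fun c => PySem.List.pyGetD (PySem.List.pyGetD game_board row []) c 0))
    (fun v => decide (v ≠ 0)) false

def shift_right_alt (game_board : List (List Int)) : List (List Int) :=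
  (PySem.List.pyRange 0 4 1).map (fun r => pvRowB game_board r)

-- ===== PRECONDITION & SPEC =====
-- A indexes rows 0..3 and, in each of those rows, columns 0..3: it raises IndexError when the
-- board has fewer than 4 rows or one of the first 4 rows has fewer than 4 entries; exactly
-- those inputs are excluded (extra rows/columns are accepted and ignored, as A does).
def Pre_shift_right (game_board : List (List Int)) : Prop :=
  4 ≤ game_board.length ∧ ∀ r ∈ game_board.take 4, 4 ≤ r.length
instance (game_board : List (List Int)) : Decidable (Pre_shift_right game_board) := by
  unfold Pre_shift_right; infer_instance

def pvWitness_shift_right : List (List Int) := [[0, 2, 0, 2], [1, 0, 0, 0], [0, 0, 0, 0], [4, 2, 3, 4]]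

def Spec_shift_right (game_board : List (List Int)) (out : List (List Int)) : Prop := out = shift_right_alt game_board
instance (game_board : List (List Int)) (out : List (List Int)) : Decidable (Spec_shift_right game_board out) := by unfold Spec_shift_right; infer_instance

-- ===== CLAIM (what is proved, stated in full; the proofs are below) =====
def Claim_equal_shift_right : Prop := ∀ (game_board : List (List Int)), Dom_shift_right game_board → Pre_shift_right game_board → Spec_shift_right game_board (shift_right game_board)

-- ===== LEMMAS AND PROOFS =====

-- the shifted row with first four entries a b c d: zeros first, then the nonzeros in order
def pvPad (a b c d : Int) : List Int :=
  let nz := ([a, b, c, d].filter (fun v => v ≠ 0))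
  List.replicate (4 - nz.length) 0 ++ nz

theorem pvGetD_set_self (nb : List (List Int)) (row : Int) (cur : List Int)
    (h0 : 0 ≤ row) (h1 : row.toNat < nb.length) :
    PySem.List.pyGetD (nb.set row.toNat cur) row [] = cur := by
  rw [PySem.List.pyGetD_eq_getElem _ _ h0 (by simp; omega)]
  exact List.getElem_set_self (by simp; omega)

-- A's inner column loop on a row whose current new_board entry is [0,0,0,0]
-- produces the padded row, in place
set_option maxHeartbeats 1000000 in
theorem pvInnerA_eq (g : List (List Int)) (row : Int) (nb : List (List Int))
    (a b c d : Int) (t : List Int)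
    (h0 : 0 ≤ row) (h1 : row.toNat < nb.length)
    (hg : PySem.List.pyGetD g row [] = a :: b :: c :: d :: t)
    (hnb : nb[row.toNat]'h1 = [0, 0, 0, 0]) :
    pvRowLoop g row nb = nb.set row.toNat (pvPad a b c d) := by
  unfold pvRowLoop
  rw [show (PySem.List.pyRange 0 4 1).reverse = [3, 2, 1, 0] from by decide]
  have hget : PySem.List.pyGetD nb row [] = [0, 0, 0, 0] := by
    rw [PySem.List.pyGetD_eq_getElem _ _ h0 (by omega)]; exact hnb
  have e3 : PySem.List.pyGetD (a::b::c::d::t) 3 0 = d := by simp [pysem]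
  have e2 : PySem.List.pyGetD (a::b::c::d::t) 2 0 = c := by simp [pysem]
  have e1 : PySem.List.pyGetD (a::b::c::d::t) 1 0 = b := by simp [pysem]
  have e0 : PySem.List.pyGetD (a::b::c::d::t) 0 0 = a := by simp [pysem]
  simp only [List.foldl_cons, List.foldl_nil, pvInnerStep, hg, e3, e2, e1, e0]
  by_cases hd : d = 0 <;> by_cases hc : c = 0 <;> by_cases hb : b = 0 <;> by_cases ha : a = 0 <;>
    simp [hd, hc, hb, ha, hget, pvPad, pvGetD_set_self _ _ _ h0, List.set_set,
      PySem.List.pySetD_of_nonneg _ _ h0, h1, PySem.List.pySetD_of_nonneg]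
  rw [← hnb, List.set_getElem_self]

-- B's stable sort by truthiness of a 4-element row is exactly the padded row
set_option maxHeartbeats 1000000 in
theorem pvSorted_eq_pad (a b c d : Int) :
    PySem.List.sorted [a, b, c, d] (fun v => !decide (v = 0)) false = pvPad a b c d := by
  have h1 : ¬((true : Bool) < false) := by decide
  have h2 : ((false : Bool) < true) := by decide
  by_cases hd : d = 0 <;> by_cases hc : c = 0 <;> by_cases hb : b = 0 <;> by_cases ha : a = 0 <;>
    simp [hd, hc, hb, ha, pvPad, PySem.List.sorted_eq_foldl_insertBy, PySem.List.insertBy, h1, h2]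

theorem pvDecomp (r : List Int) (hr : 4 ≤ r.length) : ∃ a b c d t, r = a :: b :: c :: d :: t := by
  rcases r with _ | ⟨a, _ | ⟨b, _ | ⟨c, _ | ⟨d, t⟩⟩⟩⟩ <;> simp at hr
  exact ⟨a, b, c, d, t, rfl⟩

-- ===== VERDICT (by name: the statement is the Claim_ definition above) =====
set_option maxHeartbeats 2000000 in
theorem shift_right_spec : Claim_equal_shift_right := by
  intro g _ hpre
  obtain ⟨hlen, hrows⟩ := hpre
  unfold Spec_shift_right
  rcases g with _ | ⟨r0, _ | ⟨r1, _ | ⟨r2, _ | ⟨r3, rest⟩⟩⟩⟩ <;> simp at hlen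
  obtain ⟨a0, b0, c0, d0, t0, rfl⟩ := pvDecomp r0 (hrows r0 (by simp))
  obtain ⟨a1, b1, c1, d1, t1, rfl⟩ := pvDecomp r1 (hrows r1 (by simp))
  obtain ⟨a2, b2, c2, d2, t2, rfl⟩ := pvDecomp r2 (hrows r2 (by simp))
  obtain ⟨a3, b3, c3, d3, t3, rfl⟩ := pvDecomp r3 (hrows r3 (by simp))
  have h4 : PySem.List.pyRange 0 4 1 = [0, 1, 2, 3] := by decide
  have hg0 : PySem.List.pyGetD ((a0::b0::c0::d0::t0) :: (a1::b1::c1::d1::t1) :: (a2::b2::c2::d2::t2) :: (a3::b3::c3::d3::t3) :: rest) (0:Int) [] = a0::b0::c0::d0::t0 := by simp [pysem]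
  have hg1 : PySem.List.pyGetD ((a0::b0::c0::d0::t0) :: (a1::b1::c1::d1::t1) :: (a2::b2::c2::d2::t2) :: (a3::b3::c3::d3::t3) :: rest) (1:Int) [] = a1::b1::c1::d1::t1 := by simp [pysem]
  have hg2 : PySem.List.pyGetD ((a0::b0::c0::d0::t0) :: (a1::b1::c1::d1::t1) :: (a2::b2::c2::d2::t2) :: (a3::b3::c3::d3::t3) :: rest) (2:Int) [] = a2::b2::c2::d2::t2 := by simp [pysem]
  have hg3 : PySem.List.pyGetD ((a0::b0::c0::d0::t0) :: (a1::b1::c1::d1::t1) :: (a2::b2::c2::d2::t2) :: (a3::b3::c3::d3::t3) :: rest) (3:Int) [] = a3::b3::c3::d3::t3 := by simp [pysem]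
  have e3 : ∀ (a b c d : Int) (t : List Int), PySem.List.pyGetD (a::b::c::d::t) 3 0 = d := by intros; simp [pysem]
  have e2 : ∀ (a b c d : Int) (t : List Int), PySem.List.pyGetD (a::b::c::d::t) 2 0 = c := by intros; simp [pysem]
  have e1 : ∀ (a b c d : Int) (t : List Int), PySem.List.pyGetD (a::b::c::d::t) 1 0 = b := by intros; simp [pysem]
  have e0 : ∀ (a b c d : Int) (t : List Int), PySem.List.pyGetD (a::b::c::d::t) 0 0 = a := by intros; simp [pysem]
  unfold shift_right shift_right_alt
  simp only [h4, List.foldl_cons, List.foldl_nil, List.nil_append]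
  rw [pvInnerA_eq _ 0 _ a0 b0 c0 d0 t0 (by norm_num) (by norm_num) hg0 (by rfl)]
  simp only [Int.toNat_zero]
  rw [pvInnerA_eq _ 1 _ a1 b1 c1 d1 t1 (by norm_num) (by norm_num) hg1 (by rfl)]
  simp only [Int.toNat_one]
  rw [pvInnerA_eq _ 2 _ a2 b2 c2 d2 t2 (by norm_num) (by norm_num) hg2 (by rfl)]
  simp only [show ((2:Int)).toNat = 2 from rfl]
  rw [pvInnerA_eq _ 3 _ a3 b3 c3 d3 t3 (by norm_num) (by norm_num) hg3 (by rfl)]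
  simp only [show ((3:Int)).toNat = 3 from rfl]
  simp [pvRowB, hg0, hg1, hg2, hg3, h4, e0, e1, e2, e3, pvSorted_eq_pad]
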